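-- pv_equiv track=rewrite | github.com/anastasyasidauruk1877-arch/KRIPTOGRAPI | PRAKTIKUM 3.2 KRIPTOGRAFI/PERMUTASI.py | penempatan_buku
-- ===== SOURCE A (Python) =====
-- import itertools
--
-- def penempatan_buku(n, r):
--     bagian_rak = [str(i + 1) for i in range(r)]
--     buku = [f"Buku-{i + 1}" for i in range(n)]
--     kombinasi = list(itertools.product(bagian_rak, repeat=n))
--     hasil = []
--     for k in kombinasi:
--         posisi = ", ".join([f"{buku[j]} di Rak-{k[j]}" for j in range(n)])
--         hasil.append(posisi)
--     return hasil
-- ===== SOURCE B (Python) =====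
-- def penempatan_buku(n, r):
--     shelves = [str(k + 1) for k in range(r)]
--     hasil = [""]
--     for j in range(n):
--         frag = f"Buku-{j + 1} di Rak-"
--         hasil = [(p + ", " if p else p) + frag + s for p in hasil for s in shelves]
--     return hasil
-- ===== Notes on version B (the rewrite author's own statement) =====
-- stated objective: alternative
-- what changed: B replaces itertools.product-then-format (materialize all n-tuples, then a second indexed pass joining fragments) by a single layer-by-layer build: starting from one empty placement, each book extends every partial string with every shelf, so tuples are never materialized.
import Mathlib
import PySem

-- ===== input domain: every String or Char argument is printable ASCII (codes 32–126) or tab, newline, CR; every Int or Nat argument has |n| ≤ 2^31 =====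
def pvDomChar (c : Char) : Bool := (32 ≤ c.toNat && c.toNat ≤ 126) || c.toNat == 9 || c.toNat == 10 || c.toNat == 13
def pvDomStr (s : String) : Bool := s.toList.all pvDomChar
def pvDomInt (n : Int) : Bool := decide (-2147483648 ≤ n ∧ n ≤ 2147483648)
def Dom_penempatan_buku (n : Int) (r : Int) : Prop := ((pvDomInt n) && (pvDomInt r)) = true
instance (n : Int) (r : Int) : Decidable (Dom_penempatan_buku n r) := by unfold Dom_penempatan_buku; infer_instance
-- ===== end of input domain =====

-- B builds the formatted placements layer by layer instead of materializing all product tuples and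
-- formatting them in a second pass (objective: alternative decomposition, same asymptotic cost).

-- ===== PORT A =====
-- itertools.product(pool, repeat=m): standard left-to-right expansion, rightmost factor fastest.
def pvProductStep (pool : List String) (acc : List (List String)) : List (List String) :=
  acc.flatMap (fun t => pool.map (fun x => t ++ [x]))

def pvProductRepeat (pool : List String) (m : Nat) : List (List String) :=
  (List.range m).foldl (fun acc _ => pvProductStep pool acc) [[]]

def penempatan_buku (n : Int) (r : Int) : List String :=
  let bagian_rak := (PySem.List.pyRange 0 r 1).map (fun i => PySem.Int.toStr (i + 1))
  let buku := (PySem.List.pyRange 0 n 1).map (fun i => "Buku-" ++ PySem.Int.toStr (i + 1))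
  let kombinasi := pvProductRepeat bagian_rak n.toNat
  -- buku[j] and k[j] are always in range for j in range(n); pyGetD renders the indexing exactly there
  kombinasi.map (fun k =>
    PySem.Str.join ", " ((PySem.List.pyRange 0 n 1).map (fun j =>
      PySem.List.pyGetD buku j "" ++ " di Rak-" ++ PySem.List.pyGetD k j "")))

-- ===== PORT B =====
def penempatan_buku_alt (n : Int) (r : Int) : List String :=
  let shelves := (PySem.List.pyRange 0 r 1).map (fun k => PySem.Int.toStr (k + 1))
  (PySem.List.pyRange 0 n 1).foldl
    (fun hasil j =>
      hasil.flatMap (fun p => shelves.map (fun s =>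
        (if p = "" then p else p ++ ", ") ++ ("Buku-" ++ PySem.Int.toStr (j + 1) ++ " di Rak-") ++ s)))
    [""]

-- ===== PRECONDITION & SPEC =====
-- Pre_ excludes n < 0, where A raises ValueError (itertools.product rejects a negative repeat).
def Pre_penempatan_buku (n : Int) (r : Int) : Prop := 0 ≤ n
instance (n : Int) (r : Int) : Decidable (Pre_penempatan_buku n r) := by unfold Pre_penempatan_buku; infer_instance
def pvWitness_penempatan_buku : Int × Int := (2, 2)

def Spec_penempatan_buku (n : Int) (r : Int) (out : List String) : Prop := out = penempatan_buku_alt n r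
instance (n : Int) (r : Int) (out : List String) : Decidable (Spec_penempatan_buku n r out) := by unfold Spec_penempatan_buku; infer_instance

-- ===== CLAIM (what is proved, stated in full; the proofs are below) =====
def Claim_equal_penempatan_buku : Prop := ∀ (n : Int) (r : Int), Dom_penempatan_buku n r → Pre_penempatan_buku n r → Spec_penempatan_buku n r (penempatan_buku n r)

-- ===== LEMMAS AND PROOFS =====

lemma pvProductRepeat_zero (pool : List String) : pvProductRepeat pool 0 = [[]] := rfl

lemma pvProductRepeat_succ (pool : List String) (m : Nat) :
    pvProductRepeat pool (m + 1) = pvProductStep pool (pvProductRepeat pool m) := by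
  unfold pvProductRepeat
  rw [List.range_succ, List.foldl_append, List.foldl_cons, List.foldl_nil]

-- every tuple produced by pvProductRepeat pool m has length m
lemma pvProductRepeat_length (pool : List String) (m : Nat) :
    ∀ t ∈ pvProductRepeat pool m, t.length = m := by
  induction m with
  | zero => intro t ht; rw [pvProductRepeat_zero] at ht; simp at ht; simp [ht]
  | succ k ih =>
    intro t ht
    rw [pvProductRepeat_succ] at ht
    simp only [pvProductStep, List.mem_flatMap, List.mem_map] at ht
    obtain ⟨u, hu, x, _, rfl⟩ := ht
    simp [ih u hu]

-- join over a snoc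
lemma chars_join_snoc (sep : List Char) (ps : List (List Char)) (q : List Char) :
    PySem.Chars.join sep (ps ++ [q]) =
      if ps = [] then q else PySem.Chars.join sep ps ++ sep ++ q := by
  induction ps with
  | nil => simp [PySem.Chars.join_singleton]
  | cons a l ih =>
    cases l with
    | nil => simp [PySem.Chars.join_cons_cons, PySem.Chars.join_singleton]
    | cons b l' =>
      have h1 : (a :: b :: l') ++ [q] = a :: (b :: (l' ++ [q])) := by simp
      rw [h1, PySem.Chars.join_cons_cons]
      have h2 : b :: (l' ++ [q]) = (b :: l') ++ [q] := by simp
      rw [h2, ih]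
      simp [PySem.Chars.join_cons_cons, List.append_assoc]

lemma join_append_singleton (sep : String) (ps : List String) (q : String) :
    PySem.Str.join sep (ps ++ [q]) =
      if ps = [] then q else PySem.Str.join sep ps ++ sep ++ q := by
  rw [← String.toList_inj]
  rw [PySem.Str.toList_join]
  simp only [List.map_append, List.map_cons, List.map_nil]
  rw [chars_join_snoc]
  by_cases h : ps = []
  · subst h; simp
  · rw [if_neg (by simpa using h), if_neg h]
    simp [String.toList_append, PySem.Str.toList_join]

-- a join of a nonempty-headed nonempty list is nonempty
lemma join_cons_ne_empty (sep p : String) (rest : List String) (hp : p ≠ "") :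
    PySem.Str.join sep (p :: rest) ≠ "" := by
  have hp' : p.toList ≠ [] := fun h => hp (by rw [← String.toList_inj, h]; rfl)
  intro h
  have h' := congrArg String.toList h
  rw [PySem.Str.toList_join] at h'
  cases rest with
  | nil =>
    rw [List.map_cons, List.map_nil, PySem.Chars.join_singleton] at h'
    exact hp' (by simpa using h')
  | cons b l =>
    rw [List.map_cons, List.map_cons, PySem.Chars.join_cons_cons] at h'
    have hlen := congrArg List.length h'
    simp only [List.length_append, String.toList_empty, List.length_nil] at hlen
    exact hp' (List.eq_nil_of_length_eq_zero (by omega))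

-- A's per-tuple rendering, with book labels inlined
def pvRender (m : Nat) (t : List String) : String :=
  PySem.Str.join ", " ((PySem.List.pyRange 0 (m : Int) 1).map (fun j =>
    ("Buku-" ++ PySem.Int.toStr (j + 1)) ++ " di Rak-" ++ PySem.List.pyGetD t j ""))

lemma pvRender_snoc (m : Nat) (t : List String) (x : String) (ht : t.length = m) :
    pvRender (m + 1) (t ++ [x]) =
      (if pvRender m t = "" then pvRender m t else pvRender m t ++ ", ") ++
        ("Buku-" ++ PySem.Int.toStr ((m : Int) + 1) ++ " di Rak-") ++ x := by
  have hcast : ((m + 1 : Nat) : Int) = (m : Int) + 1 := by push_cast; ring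
  unfold pvRender
  rw [hcast, PySem.List.pyRange_one_succ_right (by positivity)]
  rw [List.map_append, List.map_singleton]
  -- the last fragment picks out x
  have hlast : PySem.List.pyGetD (t ++ [x]) (m : Int) "" = x := by
    rw [PySem.List.pyGetD_natCast]
    simp [List.getD_eq_getElem?_getD, ← ht]
  rw [hlast]
  -- the first m fragments are unchanged
  have hsame : (PySem.List.pyRange 0 (m : Int) 1).map (fun j =>
        ("Buku-" ++ PySem.Int.toStr (j + 1)) ++ " di Rak-" ++ PySem.List.pyGetD (t ++ [x]) j "")
      = (PySem.List.pyRange 0 (m : Int) 1).map (fun j =>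
        ("Buku-" ++ PySem.Int.toStr (j + 1)) ++ " di Rak-" ++ PySem.List.pyGetD t j "") := by
    apply List.map_congr_left
    intro j hj
    rw [PySem.List.mem_pyRange_one] at hj
    have hjt : j < ((t ++ [x]).length : Int) := by
      rw [List.length_append, List.length_cons, List.length_nil]; push_cast; omega
    have h1 := PySem.List.pyGetD_eq_getElem (t ++ [x]) (i := j) "" hj.1 hjt
    have h2 := PySem.List.pyGetD_eq_getElem t (i := j) "" hj.1 (by omega)
    rw [h1, h2, List.getElem_append_left]
  rw [hsame, join_append_singleton]
  by_cases hm : m = 0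
  · subst hm
    simp only [Int.natCast_zero, PySem.List.pyRange_one_eq_nil (by norm_num : (0:Int) ≤ 0),
      List.map_nil]
    have : PySem.Str.join ", " ([] : List String) = "" := by
      rw [← String.toList_inj, PySem.Str.toList_join]; simp [PySem.Chars.join_nil]
    rw [if_pos this]
    rw [this, ← String.toList_inj]
    simp [String.toList_append]
  · have hmpos : (0 : Int) < (m : Int) := by positivity
    have hnil : (PySem.List.pyRange 0 (m : Int) 1).map (fun j =>
        ("Buku-" ++ PySem.Int.toStr (j + 1)) ++ " di Rak-" ++ PySem.List.pyGetD t j "") ≠ [] := by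
      simp [PySem.List.pyRange_one_cons hmpos]
    rw [if_neg hnil]
    have hne : pvRender m t ≠ "" := by
      unfold pvRender
      rw [PySem.List.pyRange_one_cons hmpos, List.map_cons]
      apply join_cons_ne_empty
      intro h
      have := congrArg String.toList h
      simp [String.toList_append] at this
    rw [if_neg (by unfold pvRender at hne; exact hne)]
    rw [← String.toList_inj]
    simp [String.toList_append, List.append_assoc]

-- the main loop invariant: B's fold after m layers = map of A's rendering over the m-fold product
lemma pvLoop_eq (P : List String) (m : Nat) :
    (PySem.List.pyRange 0 (m : Int) 1).foldl
      (fun hasil j =>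
        hasil.flatMap (fun p => P.map (fun s =>
          (if p = "" then p else p ++ ", ") ++ ("Buku-" ++ PySem.Int.toStr (j + 1) ++ " di Rak-") ++ s)))
      [""]
    = (pvProductRepeat P m).map (pvRender m) := by
  induction m with
  | zero =>
    rw [pvProductRepeat_zero]
    simp only [Int.natCast_zero, PySem.List.pyRange_one_eq_nil (le_refl (0:Int)), List.foldl_nil,
      List.map_cons, List.map_nil]
    unfold pvRender
    simp only [Int.natCast_zero, PySem.List.pyRange_one_eq_nil (le_refl (0:Int)), List.map_nil]
    rw [show PySem.Str.join ", " ([] : List String) = "" by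
      rw [← String.toList_inj, PySem.Str.toList_join]; simp [PySem.Chars.join_nil]]
  | succ k ih =>
    have hcast : ((k + 1 : Nat) : Int) = (k : Int) + 1 := by push_cast; ring
    rw [hcast, PySem.List.pyRange_one_succ_right (by positivity), List.foldl_append,
      List.foldl_cons, List.foldl_nil, ih]
    show ((pvProductRepeat P k).map (pvRender k)).flatMap (fun p => P.map (fun s =>
        (if p = "" then p else p ++ ", ") ++ ("Buku-" ++ PySem.Int.toStr ((k:Int) + 1) ++ " di Rak-") ++ s))
      = (pvProductRepeat P (k+1)).map (pvRender (k+1))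
    rw [List.flatMap_map, pvProductRepeat_succ]
    show _ = (pvProductStep P (pvProductRepeat P k)).map (pvRender (k+1))
    unfold pvProductStep
    rw [List.map_flatMap]
    apply List.flatMap_congr
    intro t ht
    rw [List.map_map]
    apply List.map_congr_left
    intro x _
    exact (pvRender_snoc k t x (pvProductRepeat_length P k t ht)).symm

-- ===== VERDICT (by name: the statement is the Claim_ definition above) =====
theorem penempatan_buku_spec : Claim_equal_penempatan_buku := by
  intro n r _ hpre
  unfold Spec_penempatan_buku penempatan_buku penempatan_buku_alt
  have hn : ((n.toNat : Nat) : Int) = n := Int.toNat_of_nonneg hpre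
  rw [← hn, pvLoop_eq]
  apply List.map_congr_left
  intro t ht
  unfold pvRender
  apply congrArg
  apply List.map_congr_left
  intro j hj
  rw [PySem.List.mem_pyRange_one] at hj
  rw [PySem.List.pyGetD_map_pyRange_of_nonneg _ _ _ _ hj.1 hj.2]
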